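-- pv_equiv track=rewrite | github.com/dio4/vista_1 | library/TNMS/Utils.py | showThisValue
-- ===== SOURCE A (Python) =====
-- categories = ['T', 'N', 'M', 'M1Loc', 'S', 'G', 'L', 'V', 'Pn', 'R', 'St']
--
-- def showThisValue(d, prefix, param, value):
--     if value == '--':
--         return False
--     if param == 'M1Loc' and d.get(prefix + 'M', '--') != '1':
--         return False
--     if param == 'St' and value == '0' and (prefix not in ['c', 'p']):
--         show = False
--         for cat in categories:
--             if cat != 'St' and d.get(prefix + cat, '--') != '--':
--                 if cat == 'M1Loc' and d.get(prefix + 'M', '--') != '1':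
--                     continue
--                 show = True
--                 break
--         return show
--     return True
-- ===== SOURCE B (Python) =====
-- categories = ['T', 'N', 'M', 'M1Loc', 'S', 'G', 'L', 'V', 'Pn', 'R', 'St']
--
-- def showThisValue(d, prefix, param, value):
--     if value == '--':
--         return False
--     if param == 'M1Loc' and d.get(prefix + 'M', '--') != '1':
--         return False
--     if param == 'St' and value == '0' and prefix not in ('c', 'p'):
--         # Instead of probing every category key, scan the dict itself:
--         # show iff some stored entry is a filled sibling category of this prefix.
--         siblings = set(categories) - {'St'}
--         m_is_1 = d.get(prefix + 'M', '--') == '1'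
--         for key, val in d.items():
--             if val != '--' and key.startswith(prefix):
--                 cat = key[len(prefix):]
--                 if cat in siblings and (cat != 'M1Loc' or m_is_1):
--                     return True
--         return False
--     return True
-- ===== Notes on version B (the rewrite author's own statement) =====
-- stated objective: alternative
-- what changed: The St=='0' branch no longer probes d with the eleven constructed keys prefix+cat; instead B scans d's own items once, keeping an entry iff its value is filled, its key starts with the prefix and the key's suffix is a sibling category (with the M1Loc gate) - the traversal is over the dict, not over the category list.
import Mathlib
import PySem

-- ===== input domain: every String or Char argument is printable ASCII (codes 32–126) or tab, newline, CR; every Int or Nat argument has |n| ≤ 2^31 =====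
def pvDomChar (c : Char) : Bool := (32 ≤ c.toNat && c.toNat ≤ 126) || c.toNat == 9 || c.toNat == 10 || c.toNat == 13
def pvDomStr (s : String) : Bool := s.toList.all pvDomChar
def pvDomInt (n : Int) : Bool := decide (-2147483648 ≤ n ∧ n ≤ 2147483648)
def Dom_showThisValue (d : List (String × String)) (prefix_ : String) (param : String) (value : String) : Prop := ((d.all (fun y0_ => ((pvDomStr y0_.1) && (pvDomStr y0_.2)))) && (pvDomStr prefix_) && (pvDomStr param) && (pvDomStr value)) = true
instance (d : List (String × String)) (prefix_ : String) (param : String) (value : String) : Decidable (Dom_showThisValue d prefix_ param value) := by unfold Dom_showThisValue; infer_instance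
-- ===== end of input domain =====

-- B replaces the St branch's probe of the eleven category keys by a single scan over the
-- dict's own items, matching each stored key's prefix and suffix (objective: alternative).

-- ===== PORT A =====
def categoriesL : List String := ["T", "N", "M", "M1Loc", "S", "G", "L", "V", "Pn", "R", "St"]

-- d.get(k, '--') on a Python dict passed as an association list
def dget (d : List (String × String)) (k : String) : String :=
  PySem.Dict.getD (PySem.Dict.mk d) k "--"

def stLoopA (d : List (String × String)) (prefix_ : String) : List String → Bool
  | [] => false
  | cat :: rest =>
    if cat != "St" && dget d (prefix_ ++ cat) != "--" then
      if cat == "M1Loc" && dget d (prefix_ ++ "M") != "1" then stLoopA d prefix_ rest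
      else true
    else stLoopA d prefix_ rest

def showThisValue (d : List (String × String)) (prefix_ : String) (param : String) (value : String) : Bool :=
  if value == "--" then false
  else if param == "M1Loc" && dget d (prefix_ ++ "M") != "1" then false
  else if param == "St" && value == "0" && !(prefix_ == "c" || prefix_ == "p") then
    stLoopA d prefix_ categoriesL
  else true

-- ===== PORT B =====
-- siblings = set(categories) - {'St'}
def siblingsB : List String :=
  PySem.Set.diff (PySem.Set.ofList categoriesL) (PySem.Set.ofList ["St"])

-- for key, val in d.items(): …  ((Dict.mk d).items IS d)
def scanB (sib : List String) (prefix_ : String) (m1 : Bool) : List (String × String) → Bool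
  | [] => false
  | (k, v) :: rest =>
    if v != "--" && PySem.Str.startswith k prefix_ then
      -- key[len(prefix):]: s[n:] with 0 ≤ n is exactly List.drop on the characters
      let cat := String.ofList (k.toList.drop prefix_.toList.length)
      if sib.contains cat && (cat != "M1Loc" || m1) then true
      else scanB sib prefix_ m1 rest
    else scanB sib prefix_ m1 rest

def showThisValue_alt (d : List (String × String)) (prefix_ : String) (param : String) (value : String) : Bool :=
  if value == "--" then false
  else if param == "M1Loc" && dget d (prefix_ ++ "M") != "1" then false
  else if param == "St" && value == "0" && !(prefix_ == "c" || prefix_ == "p") then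
    scanB siblingsB prefix_ (dget d (prefix_ ++ "M") == "1") d
  else true

-- ===== PRECONDITION & SPEC =====
-- The argument d stands for a Python dict, whose keys are necessarily distinct; Pre_ only
-- rules out association lists with a repeated key, which no Python call can produce.
def Pre_showThisValue (d : List (String × String)) (prefix_ : String) (param : String) (value : String) : Prop :=
  (d.map Prod.fst).Nodup
instance (d : List (String × String)) (prefix_ : String) (param : String) (value : String) : Decidable (Pre_showThisValue d prefix_ param value) := by unfold Pre_showThisValue; infer_instance

def pvWitness_showThisValue : (List (String × String)) × String × String × String :=
  ([("xT", "2"), ("xSt", "0")], "x", "St", "0")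

def Spec_showThisValue (d : List (String × String)) (prefix_ : String) (param : String) (value : String) (out : Bool) : Prop := out = showThisValue_alt d prefix_ param value
instance (d : List (String × String)) (prefix_ : String) (param : String) (value : String) (out : Bool) : Decidable (Spec_showThisValue d prefix_ param value out) := by unfold Spec_showThisValue; infer_instance

-- ===== CLAIM =====
def Claim_equal_showThisValue : Prop := ∀ (d : List (String × String)) (prefix_ : String) (param : String) (value : String), Dom_showThisValue d prefix_ param value → Pre_showThisValue d prefix_ param value → Spec_showThisValue d prefix_ param value (showThisValue d prefix_ param value)

-- ===== LEMMAS AND PROOFS =====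

-- A's loop is an existence check over the category list
lemma stLoopA_eq_any (d : List (String × String)) (prefix_ : String) (l : List String) :
    stLoopA d prefix_ l = l.any (fun cat =>
      cat != "St" && dget d (prefix_ ++ cat) != "--" &&
        !(cat == "M1Loc" && dget d (prefix_ ++ "M") != "1")) := by
  induction l with
  | nil => simp [stLoopA]
  | cons cat rest ih =>
    rw [stLoopA]
    by_cases h1 : cat = "St" <;> by_cases h2 : dget d (prefix_ ++ cat) = "--" <;>
      by_cases h3 : cat = "M1Loc" <;> by_cases h4 : dget d (prefix_ ++ "M") = "1" <;>
      simp_all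

-- B's loop is an existence check over the items of d
lemma scanB_eq_any (sib : List String) (prefix_ : String) (m1 : Bool) (l : List (String × String)) :
    scanB sib prefix_ m1 l = l.any (fun p =>
      p.2 != "--" && PySem.Str.startswith p.1 prefix_ &&
        (sib.contains (String.ofList (p.1.toList.drop prefix_.toList.length)) &&
          (String.ofList (p.1.toList.drop prefix_.toList.length) != "M1Loc" || m1))) := by
  induction l with
  | nil => simp [scanB]
  | cons p rest ih =>
    obtain ⟨k, v⟩ := p
    show (if v != "--" && PySem.Str.startswith k prefix_ then
            if sib.contains (String.ofList (k.toList.drop prefix_.toList.length)) &&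
                (String.ofList (k.toList.drop prefix_.toList.length) != "M1Loc" || m1) then true
            else scanB sib prefix_ m1 rest
          else scanB sib prefix_ m1 rest) = _
    cases hc1 : (v != "--" && PySem.Str.startswith k prefix_) <;>
      cases hc2 : (sib.contains (String.ofList (k.toList.drop prefix_.toList.length)) &&
          (String.ofList (k.toList.drop prefix_.toList.length) != "M1Loc" || m1)) <;>
      simp only [List.any_cons, hc1, hc2, if_true, if_false, ih] <;> simp [ih]

-- lookup / membership bridge (first match = unique match under Nodup keys)
lemma dget_of_mem (d : List (String × String)) (k v : String)
    (hnd : (d.map Prod.fst).Nodup) (hm : (k, v) ∈ d) : dget d k = v := by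
  apply PySem.Dict.getD_of_mem_items (d := PySem.Dict.mk d) (k := k) (v := v) hm
  simpa [PySem.Dict.keys, PySem.Dict.items] using hnd

lemma mem_of_dget_ne (d : List (String × String)) (k : String)
    (h : dget d k ≠ "--") : (k, dget d k) ∈ d := by
  unfold dget at h ⊢
  cases hg : (PySem.Dict.mk d).get? k with
  | none =>
    exact absurd (by rw [PySem.Dict.getD_eq_get?_getD, hg]; rfl) h
  | some v =>
    have hv : (PySem.Dict.mk d).getD k "--" = v := by
      rw [PySem.Dict.getD_eq_get?_getD, hg]; rfl
    rw [hv]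
    exact PySem.Dict.mem_items_of_get?_eq_some (d := PySem.Dict.mk d) (k := k) (v := v) hg

-- k = prefix ++ cat  ↔  k starts with prefix and its suffix is cat
lemma startswith_append (prefix_ cat : String) :
    PySem.Str.startswith (prefix_ ++ cat) prefix_ = true := by
  rw [PySem.Str.startswith_eq, PySem.Chars.startswith_iff, String.toList_append]
  exact List.prefix_append _ _

lemma drop_append (prefix_ cat : String) :
    String.ofList ((prefix_ ++ cat).toList.drop prefix_.toList.length) = cat := by
  rw [String.toList_append, List.drop_left]
  exact String.toList_inj.mp (by rw [String.toList_ofList])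

lemma reconstruct (k prefix_ : String) (h : PySem.Str.startswith k prefix_ = true) :
    prefix_ ++ String.ofList (k.toList.drop prefix_.toList.length) = k := by
  rw [PySem.Str.startswith_eq, PySem.Chars.startswith_iff] at h
  obtain ⟨t, ht⟩ := h
  apply String.toList_inj.mp
  rw [String.toList_append, String.toList_ofList, ← ht, List.drop_left]

-- suffix membership in the sibling set, spelled out on the literal list
lemma mem_siblings_iff (s : String) :
    siblingsB.contains s = true ↔ s ∈ categoriesL ∧ s ≠ "St" := by
  constructor
  · intro h
    have hm : s ∈ siblingsB := by
      simpa only [List.contains_eq_mem, decide_eq_true_eq] using h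
    have hl : siblingsB = ["T", "N", "M", "M1Loc", "S", "G", "L", "V", "Pn", "R"] := by decide
    rw [hl] at hm
    fin_cases hm <;> exact ⟨by decide, by decide⟩
  · rintro ⟨hm, hs⟩
    simp only [categoriesL, List.mem_cons, List.not_mem_nil, or_false] at hm
    rcases hm with rfl | rfl | rfl | rfl | rfl | rfl | rfl | rfl | rfl | rfl | rfl <;>
      first | (exact absurd rfl hs) | decide

-- the two existence checks agree under distinct keys
lemma main_lemma (d : List (String × String)) (prefix_ : String)
    (hnd : (d.map Prod.fst).Nodup) :
    stLoopA d prefix_ categoriesL =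
      scanB siblingsB prefix_ (dget d (prefix_ ++ "M") == "1") d := by
  rw [stLoopA_eq_any, scanB_eq_any, Bool.eq_iff_iff, List.any_eq_true, List.any_eq_true]
  constructor
  · rintro ⟨cat, hcat, h⟩
    simp only [Bool.and_eq_true, bne_iff_ne, ne_eq, Bool.not_eq_true', Bool.and_eq_false_iff,
      beq_iff_eq, Bool.not_eq_false'] at h
    obtain ⟨⟨hst, hne⟩, hm1⟩ := h
    refine ⟨(prefix_ ++ cat, dget d (prefix_ ++ cat)), mem_of_dget_ne d _ hne, ?_⟩
    simp only [Bool.and_eq_true, bne_iff_ne, ne_eq, Bool.or_eq_true, beq_iff_eq]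
    refine ⟨⟨hne, startswith_append prefix_ cat⟩, ?_⟩
    rw [drop_append]
    refine ⟨(mem_siblings_iff cat).2 ⟨hcat, hst⟩, ?_⟩
    rcases hm1 with h | h <;> simp_all [bne]
  · rintro ⟨⟨k, v⟩, hmem, h⟩
    simp only [Bool.and_eq_true, bne_iff_ne, ne_eq, Bool.or_eq_true, beq_iff_eq] at h
    obtain ⟨⟨hv, hsw⟩, hsib, hm1⟩ := h
    set cat := String.ofList (k.toList.drop prefix_.toList.length) with hcatdef
    obtain ⟨hcm, hcs⟩ := (mem_siblings_iff cat).1 hsib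
    have hk : prefix_ ++ cat = k := reconstruct k prefix_ hsw
    have hget : dget d (prefix_ ++ cat) = v := by
      rw [hk]; exact dget_of_mem d k v hnd hmem
    refine ⟨cat, hcm, ?_⟩
    simp only [Bool.and_eq_true, bne_iff_ne, ne_eq, Bool.not_eq_true', Bool.and_eq_false_iff,
      beq_iff_eq, Bool.not_eq_false']
    refine ⟨⟨hcs, by rw [hget]; exact hv⟩, ?_⟩
    rcases hm1 with h | h <;> simp_all [bne]

-- ===== VERDICT =====
theorem showThisValue_spec : Claim_equal_showThisValue := by
  intro d prefix_ param value _ hnd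
  unfold Spec_showThisValue showThisValue showThisValue_alt
  split_ifs <;> first
    | rfl
    | exact main_lemma d prefix_ hnd
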